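-- pv_equiv track=rewrite | github.com/micabaum/GLOBAL-Baum-Cornejo-Vera | Global/Global/clases.py | detectarMutanteHorizontal
-- ===== SOURCE A (Python) =====
-- def detectarMutanteHorizontal(adn):
--
--     for filas in adn:
--
--         contador = 0
--         contador1 = 0
--         contador2 = 0
--         contador3 = 0
--
--         for base in filas:
--             if base == 'A':
--                 contador += 1
--                 if contador >= 4:
--                     return True
--             elif base == 'T':
--                 contador1 += 1
--                 if contador1 >= 4:
--                     return True
--             elif base == 'C':
--                 contador2 += 1
--                 if contador2 >= 4:
--                     return True
--             elif base == 'G':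
--                 contador3 += 1
--                 if contador3 >= 4:
--                     return True
--     return False
-- ===== SOURCE B (Python) =====
-- def detectarMutanteHorizontal(adn):
--     # Sort-then-scan: in a sorted row, equal characters are contiguous,
--     # so a base occurs >= 4 times iff some run of it reaches length 4.
--     for fila in adn:
--         prev = None
--         run = 0
--         for ch in sorted(fila):
--             run = run + 1 if ch == prev else 1
--             prev = ch
--             if run >= 4 and ch in 'ATCG':
--                 return True
--     return False
-- ===== Notes on version B (the rewrite author's own statement) =====
-- stated objective: alternative
-- what changed: Instead of maintaining four per-base counters with early-return branches while streaming the row, B sorts each row and scans it once for a run of length >= 4 of a base character (equal characters are contiguous after sorting, so a run of length 4 exists iff the base occurs >= 4 times).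
import Mathlib
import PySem

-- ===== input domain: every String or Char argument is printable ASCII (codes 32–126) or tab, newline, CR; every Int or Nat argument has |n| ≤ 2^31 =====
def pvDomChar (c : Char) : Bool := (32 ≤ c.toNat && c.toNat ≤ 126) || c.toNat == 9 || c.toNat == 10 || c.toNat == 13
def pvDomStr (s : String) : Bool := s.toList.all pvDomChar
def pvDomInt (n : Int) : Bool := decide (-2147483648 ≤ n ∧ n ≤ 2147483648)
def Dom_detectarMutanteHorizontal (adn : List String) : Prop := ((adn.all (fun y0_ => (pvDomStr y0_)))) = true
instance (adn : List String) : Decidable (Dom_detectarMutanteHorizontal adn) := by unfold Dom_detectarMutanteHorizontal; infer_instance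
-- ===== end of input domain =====

-- B replaces A's four streamed counters with early-return branches by sort-then-scan:
-- it sorts each row and looks for a run of length >= 4 of a base character (alternative).

-- ===== PORT A =====
-- inner loop of A over the row's characters, carrying the four counters;
-- returns true exactly when A executes `return True` inside this row.
def pvA_inner : List Char → Nat → Nat → Nat → Nat → Bool
  | [], _, _, _, _ => false
  | base :: rest, c0, c1, c2, c3 =>
    if base == 'A' then
      if c0 + 1 ≥ 4 then true else pvA_inner rest (c0 + 1) c1 c2 c3
    else if base == 'T' then
      if c1 + 1 ≥ 4 then true else pvA_inner rest c0 (c1 + 1) c2 c3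
    else if base == 'C' then
      if c2 + 1 ≥ 4 then true else pvA_inner rest c0 c1 (c2 + 1) c3
    else if base == 'G' then
      if c3 + 1 ≥ 4 then true else pvA_inner rest c0 c1 c2 (c3 + 1)
    else pvA_inner rest c0 c1 c2 c3

def pvA_rows : List String → Bool
  | [] => false
  | filas :: rest =>
    if pvA_inner filas.toList 0 0 0 0 then true else pvA_rows rest

def detectarMutanteHorizontal (adn : List String) : Bool := pvA_rows adn

-- ===== PORT B =====
-- scan of sorted(fila) carrying (prev, run); 'ch in "ATCG"' is the 4-way membership test
def pvB_scan : List Char → Option Char → Nat → Bool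
  | [], _, _ => false
  | ch :: rest, prev, run =>
    let run' := if some ch == prev then run + 1 else 1
    if run' ≥ 4 && (ch == 'A' || ch == 'T' || ch == 'C' || ch == 'G') then true
    else pvB_scan rest (some ch) run'

def pvB_row (fila : String) : Bool :=
  pvB_scan (PySem.List.sorted fila.toList (fun x => x) false) none 0

def pvB_rows : List String → Bool
  | [] => false
  | fila :: rest => if pvB_row fila then true else pvB_rows rest

def detectarMutanteHorizontal_alt (adn : List String) : Bool := pvB_rows adn

-- ===== PRECONDITION & SPEC =====
def Spec_detectarMutanteHorizontal (adn : List String) (out : Bool) : Prop := out = detectarMutanteHorizontal_alt adn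
instance (adn : List String) (out : Bool) : Decidable (Spec_detectarMutanteHorizontal adn out) := by unfold Spec_detectarMutanteHorizontal; infer_instance

-- ===== CLAIM (what is proved, stated in full; the proofs are below) =====
def Claim_equal_detectarMutanteHorizontal : Prop := ∀ (adn : List String), Dom_detectarMutanteHorizontal adn → Spec_detectarMutanteHorizontal adn (detectarMutanteHorizontal adn)

-- ===== LEMMAS AND PROOFS =====

-- A's inner loop, started with counters below the threshold, fires iff some base's
-- starting counter plus its number of remaining occurrences reaches 4.
lemma pvA_inner_eq (cs : List Char) : ∀ (c0 c1 c2 c3 : Nat),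
    c0 < 4 → c1 < 4 → c2 < 4 → c3 < 4 →
    pvA_inner cs c0 c1 c2 c3 =
      decide (c0 + cs.count 'A' ≥ 4 ∨ c1 + cs.count 'T' ≥ 4 ∨
              c2 + cs.count 'C' ≥ 4 ∨ c3 + cs.count 'G' ≥ 4) := by
  induction cs with
  | nil => intro c0 c1 c2 c3 h0 h1 h2 h3; simp [pvA_inner]; omega
  | cons b rest ih =>
    intro c0 c1 c2 c3 h0 h1 h2 h3
    have hcc : ∀ c : Char, (b :: rest).count c = rest.count c + (if b = c then 1 else 0) := by
      intro c; simp [List.count_cons]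
    rw [hcc 'A', hcc 'T', hcc 'C', hcc 'G']
    by_cases hA : b = 'A'
    · rw [show pvA_inner (b :: rest) c0 c1 c2 c3 =
          (if c0 + 1 ≥ 4 then true else pvA_inner rest (c0 + 1) c1 c2 c3) from by
        subst hA; rfl]
      have hT : b ≠ 'T' := by subst hA; decide
      have hC : b ≠ 'C' := by subst hA; decide
      have hG : b ≠ 'G' := by subst hA; decide
      rw [if_pos hA, if_neg hT, if_neg hC, if_neg hG]
      by_cases h : c0 + 1 ≥ 4
      · rw [if_pos h]; simp; omega
      · rw [if_neg h, ih (c0 + 1) c1 c2 c3 (by omega) h1 h2 h3,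
          show c0 + (rest.count 'A' + 1) = c0 + 1 + rest.count 'A' from by omega]
        simp
    · by_cases hT : b = 'T'
      · rw [show pvA_inner (b :: rest) c0 c1 c2 c3 =
            (if c1 + 1 ≥ 4 then true else pvA_inner rest c0 (c1 + 1) c2 c3) from by
          subst hT; rfl]
        have hC : b ≠ 'C' := by subst hT; decide
        have hG : b ≠ 'G' := by subst hT; decide
        rw [if_neg hA, if_pos hT, if_neg hC, if_neg hG]
        by_cases h : c1 + 1 ≥ 4
        · rw [if_pos h]; simp; omega
        · rw [if_neg h, ih c0 (c1 + 1) c2 c3 h0 (by omega) h2 h3,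
            show c1 + (rest.count 'T' + 1) = c1 + 1 + rest.count 'T' from by omega]
          simp
      · by_cases hC : b = 'C'
        · rw [show pvA_inner (b :: rest) c0 c1 c2 c3 =
              (if c2 + 1 ≥ 4 then true else pvA_inner rest c0 c1 (c2 + 1) c3) from by
            subst hC; rfl]
          have hG : b ≠ 'G' := by subst hC; decide
          rw [if_neg hA, if_neg hT, if_pos hC, if_neg hG]
          by_cases h : c2 + 1 ≥ 4
          · rw [if_pos h]; simp; omega
          · rw [if_neg h, ih c0 c1 (c2 + 1) c3 h0 h1 (by omega) h3,
              show c2 + (rest.count 'C' + 1) = c2 + 1 + rest.count 'C' from by omega]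
            simp
        · by_cases hG : b = 'G'
          · rw [show pvA_inner (b :: rest) c0 c1 c2 c3 =
                (if c3 + 1 ≥ 4 then true else pvA_inner rest c0 c1 c2 (c3 + 1)) from by
              subst hG; rfl]
            rw [if_neg hA, if_neg hT, if_neg hC, if_pos hG]
            by_cases h : c3 + 1 ≥ 4
            · rw [if_pos h]; simp; omega
            · rw [if_neg h, ih c0 c1 c2 (c3 + 1) h0 h1 h2 (by omega),
                show c3 + (rest.count 'G' + 1) = c3 + 1 + rest.count 'G' from by omega]
              simp
          · rw [show pvA_inner (b :: rest) c0 c1 c2 c3 = pvA_inner rest c0 c1 c2 c3 from by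
              simp [pvA_inner, hA, hT, hC, hG]]
            rw [if_neg hA, if_neg hT, if_neg hC, if_neg hG]
            rw [ih c0 c1 c2 c3 h0 h1 h2 h3]
            simp

-- the run-count a base c carries into the scan state (prev = some p, run = r)
def pvBase (p : Char) (r : Nat) (c : Char) : Nat := if c = p then r else 0

-- B's scan on a sorted remainder whose elements all dominate prev fires iff some base's
-- carried run plus its count in the remainder reaches 4.
lemma pvB_scan_eq (xs : List Char) : ∀ (p : Char) (r : Nat),
    xs.Pairwise (· ≤ ·) → (∀ x ∈ xs, p ≤ x) →
    (¬ ((p = 'A' ∨ p = 'T' ∨ p = 'C' ∨ p = 'G') ∧ r ≥ 4)) →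
    pvB_scan xs (some p) r =
      decide (pvBase p r 'A' + xs.count 'A' ≥ 4 ∨ pvBase p r 'T' + xs.count 'T' ≥ 4 ∨
              pvBase p r 'C' + xs.count 'C' ≥ 4 ∨ pvBase p r 'G' + xs.count 'G' ≥ 4) := by
  induction xs with
  | nil =>
    intro p r _ _ hne
    have hb : ∀ c : Char, (c = 'A' ∨ c = 'T' ∨ c = 'C' ∨ c = 'G') → pvBase p r c < 4 := by
      intro c hc
      unfold pvBase
      split_ifs with h
      · by_contra hr
        exact hne ⟨by rw [← h]; exact hc, by omega⟩
      · omega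
    have hA := hb 'A' (Or.inl rfl)
    have hT := hb 'T' (Or.inr (Or.inl rfl))
    have hC := hb 'C' (Or.inr (Or.inr (Or.inl rfl)))
    have hG := hb 'G' (Or.inr (Or.inr (Or.inr rfl)))
    simp only [pvB_scan, List.count_nil, Nat.add_zero]
    rw [eq_comm, decide_eq_false_iff_not]
    omega
  | cons ch rest ih =>
    intro p r hpw hdom hne
    have hpw' : rest.Pairwise (· ≤ ·) := hpw.of_cons
    have hdomch : ∀ x ∈ rest, ch ≤ x := fun x hx => (List.pairwise_cons.mp hpw).1 x hx
    by_cases hpc : ch = p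
    · -- run continues: run' = r + 1
      subst hpc
      have hstep : pvB_scan (ch :: rest) (some ch) r =
          (if r + 1 ≥ 4 && (ch == 'A' || ch == 'T' || ch == 'C' || ch == 'G') then true
           else pvB_scan rest (some ch) (r + 1)) := by
        simp [pvB_scan]
      rw [hstep]
      by_cases hbase : ch = 'A' ∨ ch = 'T' ∨ ch = 'C' ∨ ch = 'G'
      · by_cases hr : r + 1 ≥ 4
        · rw [if_pos (by rcases hbase with h|h|h|h <;> subst h <;> simp [hr])]
          rcases hbase with h|h|h|h <;> subst h <;>
            simp [pvBase] <;> omega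
        · rw [if_neg (by rcases hbase with h|h|h|h <;> subst h <;> simp <;> omega)]
          rw [ih ch (r + 1) hpw' hdomch (by rintro ⟨_, hh⟩; omega), decide_eq_decide]
          have key : ∀ c : Char,
              (pvBase ch (r + 1) c + rest.count c ≥ 4 ↔ pvBase ch r c + (ch :: rest).count c ≥ 4) := by
            intro c
            by_cases hcch : c = ch
            · subst hcch; simp [pvBase]; omega
            · rw [show pvBase ch (r + 1) c = 0 from if_neg hcch,
                  show pvBase ch r c = 0 from if_neg hcch, List.count_cons_of_ne (Ne.symm hcch)]
          exact or_congr (key 'A') (or_congr (key 'T') (or_congr (key 'C') (key 'G')))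
      · have h1 : ch ≠ 'A' := fun h => hbase (Or.inl h)
        have h2 : ch ≠ 'T' := fun h => hbase (Or.inr (Or.inl h))
        have h3 : ch ≠ 'C' := fun h => hbase (Or.inr (Or.inr (Or.inl h)))
        have h4 : ch ≠ 'G' := fun h => hbase (Or.inr (Or.inr (Or.inr h)))
        rw [if_neg (by simp [h1, h2, h3, h4])]
        rw [ih ch (r + 1) hpw' hdomch (by rintro ⟨hh, _⟩; exact hbase hh), decide_eq_decide]
        have key : ∀ c : Char, c ≠ ch →
            (pvBase ch (r + 1) c + rest.count c ≥ 4 ↔ pvBase ch r c + (ch :: rest).count c ≥ 4) := by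
          intro c hcch
          rw [show pvBase ch (r + 1) c = 0 from if_neg hcch,
              show pvBase ch r c = 0 from if_neg hcch, List.count_cons_of_ne (Ne.symm hcch)]
        exact or_congr (key 'A' (fun h => h1 h.symm))
          (or_congr (key 'T' (fun h => h2 h.symm))
            (or_congr (key 'C' (fun h => h3 h.symm)) (key 'G' (fun h => h4 h.symm))))
    · -- run restarts at 1; p cannot occur any more (p < ch ≤ everything in rest)
      have hplt : p < ch := lt_of_le_of_ne (hdom ch List.mem_cons_self) (fun h => hpc h.symm)
      have hpnot : p ∉ rest := fun hmem => absurd (hdomch p hmem) (not_le.mpr hplt)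
      have hstep : pvB_scan (ch :: rest) (some p) r =
          (if 1 ≥ 4 && (ch == 'A' || ch == 'T' || ch == 'C' || ch == 'G') then true
           else pvB_scan rest (some ch) 1) := by
        simp [pvB_scan, hpc]
      rw [hstep, if_neg (by simp), ih ch 1 hpw' hdomch (by rintro ⟨_, hh⟩; omega),
        decide_eq_decide]
      have key : ∀ c : Char, (c = 'A' ∨ c = 'T' ∨ c = 'C' ∨ c = 'G') →
          (pvBase ch 1 c + rest.count c ≥ 4 ↔ pvBase p r c + (ch :: rest).count c ≥ 4) := by
        intro c hc
        by_cases hcp : c = p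
        · -- this base's run is over: both sides false
          have hr4 : r < 4 := by
            by_contra h; exact hne ⟨by rw [← hcp]; exact hc, by omega⟩
          have hcch : c ≠ ch := fun h => hpc (h.symm.trans hcp)
          have hcrest : rest.count c = 0 := List.count_eq_zero.mpr (hcp ▸ hpnot)
          rw [show pvBase ch 1 c = 0 from if_neg hcch, show pvBase p r c = r from if_pos hcp,
              List.count_cons_of_ne (Ne.symm hcch), hcrest]
          omega
        · by_cases hcch : c = ch
          · subst hcch
            rw [show pvBase c 1 c = 1 from if_pos rfl, show pvBase p r c = 0 from if_neg hcp,
              List.count_cons_self]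
            omega
          · rw [show pvBase ch 1 c = 0 from if_neg hcch, show pvBase p r c = 0 from if_neg hcp,
              List.count_cons_of_ne (Ne.symm hcch)]
      exact or_congr (key 'A' (Or.inl rfl)) (or_congr (key 'T' (Or.inr (Or.inl rfl)))
        (or_congr (key 'C' (Or.inr (Or.inr (Or.inl rfl)))) (key 'G' (Or.inr (Or.inr (Or.inr rfl))))))

-- B's row test equals the count condition on the original row.
lemma pvB_row_eq (fila : String) :
    pvB_row fila =
      decide (fila.toList.count 'A' ≥ 4 ∨ fila.toList.count 'T' ≥ 4 ∨
              fila.toList.count 'C' ≥ 4 ∨ fila.toList.count 'G' ≥ 4) := by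
  unfold pvB_row
  have hperm : (PySem.List.sorted fila.toList (fun x => x) false).Perm fila.toList :=
    PySem.List.sorted_perm fila.toList (fun x => x) false
  have hcnt : ∀ c : Char,
      (PySem.List.sorted fila.toList (fun x => x) false).count c = fila.toList.count c :=
    fun c => hperm.count_eq c
  have hpw : (PySem.List.sorted fila.toList (fun x => x) false).Pairwise (· ≤ ·) :=
    PySem.List.sorted_pairwise fila.toList (fun x => x)
  rcases hs : PySem.List.sorted fila.toList (fun x => x) false with _ | ⟨h, t⟩
  · rw [show pvB_scan [] none 0 = false from rfl]
    have : ∀ c : Char, fila.toList.count c = 0 := by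
      intro c; rw [← hcnt c, hs]; rfl
    simp [this]
  · rw [show pvB_scan (h :: t) none 0 = pvB_scan t (some h) 1 from by simp [pvB_scan]]
    rw [hs] at hpw
    have hdomh : ∀ x ∈ t, h ≤ x := fun x hx => (List.pairwise_cons.mp hpw).1 x hx
    rw [pvB_scan_eq t h 1 hpw.of_cons hdomh (by rintro ⟨_, hh⟩; omega), decide_eq_decide]
    have key : ∀ c : Char, pvBase h 1 c + t.count c = fila.toList.count c := by
      intro c
      rw [← hcnt c, hs]
      by_cases hch : c = h
      · subst hch
        rw [show pvBase c 1 c = 1 from if_pos rfl, List.count_cons_self]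
        omega
      · rw [show pvBase h 1 c = 0 from if_neg hch, List.count_cons_of_ne (Ne.symm hch)]
        omega
    rw [key 'A', key 'T', key 'C', key 'G']

lemma pv_rows_eq (adn : List String) : pvA_rows adn = pvB_rows adn := by
  induction adn with
  | nil => rfl
  | cons f rest ih =>
    simp only [pvA_rows, pvB_rows, pvA_inner_eq f.toList 0 0 0 0
      (by omega) (by omega) (by omega) (by omega), pvB_row_eq, ih, Nat.zero_add]

-- ===== VERDICT (by name: the statement is the Claim_ definition above) =====
theorem detectarMutanteHorizontal_spec : Claim_equal_detectarMutanteHorizontal := by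
  intro adn _
  unfold Spec_detectarMutanteHorizontal detectarMutanteHorizontal detectarMutanteHorizontal_alt
  exact pv_rows_eq adn
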